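-- pv_equiv track=rewrite | github.com/AP-MI-2021/lab-3-Romeliu | main.py | all_same_number_of_1_bits
-- ===== SOURCE A (Python) =====
-- def number_of_1_bits(numar: int) -> int:
--     #returneaza numarul de biti de 1 din reprezentarea binara a numarului primit
--     numar_de_1_biti = 0
--     while numar:
--         if numar % 2 == 1:
--             numar_de_1_biti += 1
--         numar = numar // 2
--     return numar_de_1_biti
--
-- def all_same_number_of_1_bits(lista):
--     #returneaza True daca toate numerele din lista primita au acelasi numar de biti de 1 in reprezentarea binara
--     element = 0
--     for numar in lista:
--         if element == 0:
--             number_of_1_bits_var = number_of_1_bits(numar)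
--         if not number_of_1_bits(numar) == number_of_1_bits_var:
--             return False
--         element += 1
--     return True
-- ===== SOURCE B (Python) =====
-- def number_of_1_bits(numar: int) -> int:
--     #returneaza numarul de biti de 1 din reprezentarea binara a numarului primit
--     numar_de_1_biti = 0
--     while numar:
--         if numar % 2 == 1:
--             numar_de_1_biti += 1
--         numar = numar // 2
--     return numar_de_1_biti
--
-- def all_same_number_of_1_bits(lista):
--     #True iff the popcounts of the elements form at most one distinct value:
--     #stage 1 collects every popcount into a set, stage 2 is one cardinality check.
--     return len({number_of_1_bits(n) for n in lista}) <= 1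
-- ===== Notes on version B (the rewrite author's own statement) =====
-- stated objective: simpler
-- what changed: Replaces A's stateful loop (counter variable, lazily-initialised reference popcount, per-element comparison with early return) by two stages with no loop state: collect the set of all popcounts, then return whether its cardinality is at most one. Pre_ excludes lists containing a negative number, on which the shared popcount helper loops forever: A returns there only when its early exit accidentally fires before reaching the negative element, while B's staged version computes every popcount and diverges.
-- outside the precondition, e.g. on all_same_number_of_1_bits([4, 0, 2, 107, -1]): A returns False, B does not finish within the time limit
import Mathlib
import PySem

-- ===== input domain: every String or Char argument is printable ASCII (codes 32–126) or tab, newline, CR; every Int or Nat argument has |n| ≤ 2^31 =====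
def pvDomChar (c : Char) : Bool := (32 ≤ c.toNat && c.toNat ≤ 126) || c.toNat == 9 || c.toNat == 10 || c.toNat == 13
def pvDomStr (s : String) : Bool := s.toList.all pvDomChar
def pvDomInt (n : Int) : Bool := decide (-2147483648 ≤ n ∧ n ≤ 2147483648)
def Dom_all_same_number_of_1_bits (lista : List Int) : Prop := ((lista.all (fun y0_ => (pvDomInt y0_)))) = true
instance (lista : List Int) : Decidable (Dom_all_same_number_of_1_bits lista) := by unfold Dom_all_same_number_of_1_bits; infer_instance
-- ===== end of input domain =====

-- B replaces A's stateful comparison loop (counter, lazily-set reference popcount,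
-- early return) by two stages: build the set of all popcounts, then one cardinality
-- check (objective: simpler). On a list with a negative element both Pythons loop
-- forever (shared helper); Pre_ excludes lists with a negative element, since A's early
-- exit can accidentally return False before reaching the negative where B diverges.


-- ===== PORT A =====
-- helper: the while-loop of number_of_1_bits; the '0 < numar' guard only makes the
-- recursion total (on negatives the Python loop diverges).
def number_of_1_bits_go (numar : Int) (numar_de_1_biti : Int) : Int :=
  if _h : 0 < numar then
    number_of_1_bits_go (PySem.Int.floordiv numar 2)
      (if PySem.Int.mod numar 2 == 1 then numar_de_1_biti + 1 else numar_de_1_biti)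
  else numar_de_1_biti
termination_by numar.toNat
decreasing_by
  have : PySem.Int.floordiv numar 2 = numar / 2 :=
    PySem.Int.floordiv_eq_ediv_of_pos (by omega)
  rw [this]; omega

def number_of_1_bits (numar : Int) : Int := number_of_1_bits_go numar 0

-- the for-loop of A, carrying the counter 'element' and number_of_1_bits_var
def all_same_go (lista : List Int) (element : Int) (number_of_1_bits_var : Int) : Bool :=
  match lista with
  | [] => true
  | numar :: rest =>
    let number_of_1_bits_var :=
      if element == 0 then number_of_1_bits numar else number_of_1_bits_var
    if !(number_of_1_bits numar == number_of_1_bits_var) then false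
    else all_same_go rest (element + 1) number_of_1_bits_var

def all_same_number_of_1_bits (lista : List Int) : Bool := all_same_go lista 0 0

-- ===== PORT B =====
-- B's copy of the helper: same while-loop; on negatives the Python loop diverges
-- (outside Pre_), and this port's totality device returns the junk value -1 there.
def number_of_1_bits_alt (numar : Int) : Int :=
  if numar < 0 then -1 else number_of_1_bits_go numar 0

-- B: the set comprehension {number_of_1_bits(n) for n in lista}, then len ≤ 1
def all_same_number_of_1_bits_alt (lista : List Int) : Bool :=
  decide (PySem.Set.len (PySem.Set.ofList (lista.map number_of_1_bits_alt)) ≤ 1)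

-- ===== PRECONDITION & SPEC =====
-- Pre_ excludes lists containing a negative number, on which the shared popcount helper
-- loops forever: A returns there only when its early exit accidentally fires before
-- reaching the negative element, while B's staged version computes every popcount and diverges.
def Pre_all_same_number_of_1_bits (lista : List Int) : Prop := lista.all (fun n => 0 ≤ n) = true
instance (lista : List Int) : Decidable (Pre_all_same_number_of_1_bits lista) := by unfold Pre_all_same_number_of_1_bits; infer_instance
def pvWitness_all_same_number_of_1_bits : List Int := [3, 5, 6]

def Spec_all_same_number_of_1_bits (lista : List Int) (out : Bool) : Prop := out = all_same_number_of_1_bits_alt lista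
instance (lista : List Int) (out : Bool) : Decidable (Spec_all_same_number_of_1_bits lista out) := by unfold Spec_all_same_number_of_1_bits; infer_instance

-- ===== CLAIM =====
def Claim_equal_all_same_number_of_1_bits : Prop := ∀ (lista : List Int), Dom_all_same_number_of_1_bits lista → Pre_all_same_number_of_1_bits lista → Spec_all_same_number_of_1_bits lista (all_same_number_of_1_bits lista)

-- ===== LEMMAS AND PROOFS =====

-- A's loop after the first element: element ≠ 0, so the reference variable is fixed
theorem all_same_go_ne_zero (l : List Int) (k v : Int) (hk : 0 < k) :
    all_same_go l k v = l.all (fun n => number_of_1_bits n == v) := by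
  induction l generalizing k with
  | nil => rfl
  | cons x rest ih =>
    have hk0 : (k == 0) = false := by simp; omega
    simp only [all_same_go, List.all_cons, hk0, Bool.false_eq_true, if_false]
    by_cases h : number_of_1_bits x = v
    · simp [h, ih (k + 1) (by omega)]
    · simp [h]

-- adding to a set never shrinks it
theorem len_le_len_add (s : PySem.Set Int) (x : Int) :
    s.length ≤ (PySem.Set.add s x).length := by
  simp only [PySem.Set.add]
  split <;> simp

theorem len_le_foldl_add (ys : List Int) (s : PySem.Set Int) :
    s.length ≤ (ys.foldl PySem.Set.add s).length := by
  induction ys generalizing s with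
  | nil => simp
  | cons y ys ih =>
    exact le_trans (len_le_len_add s y) (ih _)

-- folding adds over a singleton stays a singleton iff every element equals v
theorem foldl_add_singleton (ys : List Int) (v : Int) :
    ((ys.foldl PySem.Set.add [v]).length ≤ 1) ↔ ys.all (fun y => y == v) := by
  induction ys with
  | nil => simp
  | cons y ys ih =>
    by_cases h : y = v
    · have : PySem.Set.add [v] y = [v] := by
        simp [PySem.Set.add, PySem.Set.contains, h]
      simp [List.foldl_cons, PySem.Set.add, PySem.Set.contains, h, ih]
    · have h2 : PySem.Set.add [v] y = [v, y] := by
        simp [PySem.Set.add, PySem.Set.contains]; exact fun hh => h hh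
      have := len_le_foldl_add ys [v, y]
      simp only [List.foldl_cons, h2, List.all_cons]
      constructor
      · intro hle; simp at this; omega
      · intro hall; simp [h] at hall
      
-- ===== VERDICT =====
theorem all_same_number_of_1_bits_spec : Claim_equal_all_same_number_of_1_bits := by
  intro lista _ hpre
  unfold Spec_all_same_number_of_1_bits
  have hmap : lista.map number_of_1_bits_alt = lista.map number_of_1_bits := by
    refine List.map_congr_left (fun n hn => ?_)
    have hpre' : ∀ m ∈ lista, (0 : Int) ≤ m := by
      simpa [Pre_all_same_number_of_1_bits, List.all_eq_true] using hpre
    have h0 : (0 : Int) ≤ n := hpre' n hn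
    simp [number_of_1_bits_alt, number_of_1_bits, not_lt.mpr h0]
  unfold all_same_number_of_1_bits_alt
  rw [hmap]
  cases lista with
  | nil => rfl
  | cons x rest =>
    have hA : all_same_number_of_1_bits (x :: rest)
        = all_same_go rest 1 (number_of_1_bits x) := by
      simp [all_same_number_of_1_bits, all_same_go]
    have hB : decide (PySem.Set.len (PySem.Set.ofList ((x :: rest).map number_of_1_bits)) ≤ 1)
        = decide (((rest.map number_of_1_bits).foldl PySem.Set.add
            [number_of_1_bits x]).length ≤ 1) := by
      simp [PySem.Set.ofList_eq_foldl, PySem.Set.len,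
        List.foldl_cons, PySem.Set.add, PySem.Set.contains]
    rw [hA, hB, all_same_go_ne_zero rest 1 (number_of_1_bits x) (by omega)]
    simp only [foldl_add_singleton, List.all_map]
    rw [Bool.eq_iff_iff]
    simp [List.all_eq_true]
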